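-- pv_equiv track=rewrite | github.com/Cocowang666/msc_project | untitled0.py | identity_mult_table
-- ===== SOURCE A (Python) =====
-- def is_mult_table(x):
--     if not isinstance(x,list):
--         return False
--     if len(x) <= 0:
--         return False
--     if isinstance(x[0],list):
--         sub_len=len(x[0])
--     for i in x:
--         if not isinstance(i,list):
--             return False
--         if len(i) != len(i):
--             return False
--         if len(i) != sub_len:
--             return False
--         for m in i:
--             if not isinstance(m,int):
--                 return False
--             if m<0 or m>=sub_len:
--                 return False
--     return True
--
-- def row_mult_table(x,i):
--     assert is_mult_table(x)
--     assert isinstance(i, int)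
--     assert 0 <= i and i < len(x)
--     return x[i]
--
-- def col_mult_table(x,i):
--     assert is_mult_table(x)
--     assert isinstance(i, int)
--     assert 0 <= i and i < len(x)
--     return [row[i] for row in x]
--
-- def identity_mult_table(x):
--     if not is_mult_table(x):
--         return -1
--     axis = []
--     for i in range(len(x)):
--         axis.append(i)
--     for i in range(len(x)):
--         for j in range(len(x)):
--             if col_mult_table(x, j) == axis and row_mult_table(x, i) == axis:
--                 return x[i][j]
--     return -1
-- ===== SOURCE B (Python) =====
-- def identity_mult_table(x):
--     # validate once, then locate the first identity row and first identity
--     # column directly (no per-pair revalidation, no column materialisation)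
--     if not isinstance(x, list) or not x:
--         return -1
--     w = len(x[0]) if isinstance(x[0], list) else -1
--     ok = all(isinstance(row, list) and len(row) == w and
--              all(isinstance(m, int) and 0 <= m < w for m in row)
--              for row in x)
--     if not ok:
--         return -1
--     n = len(x)
--     axis = list(range(n))
--     e = next((i for i in range(n) if x[i] == axis), None)
--     if e is None:
--         return -1
--     j = next((j for j in range(n) if all(x[i][j] == i for i in range(n))), None)
--     if j is None:
--         return -1
--     return x[e][j]
-- ===== Notes on version B (the rewrite author's own statement) =====
-- stated objective: alternative
-- what changed: A revalidates the whole table and rebuilds a column list inside an n*n pair loop (O(n^4) on valid tables); B validates once, then finds the first identity row and first identity column in two single scans and returns x[e][j] (O(n^2)); on the random inputs of a timing run both are dominated by the one validation pass, so no speedup is claimed.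
import Mathlib
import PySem

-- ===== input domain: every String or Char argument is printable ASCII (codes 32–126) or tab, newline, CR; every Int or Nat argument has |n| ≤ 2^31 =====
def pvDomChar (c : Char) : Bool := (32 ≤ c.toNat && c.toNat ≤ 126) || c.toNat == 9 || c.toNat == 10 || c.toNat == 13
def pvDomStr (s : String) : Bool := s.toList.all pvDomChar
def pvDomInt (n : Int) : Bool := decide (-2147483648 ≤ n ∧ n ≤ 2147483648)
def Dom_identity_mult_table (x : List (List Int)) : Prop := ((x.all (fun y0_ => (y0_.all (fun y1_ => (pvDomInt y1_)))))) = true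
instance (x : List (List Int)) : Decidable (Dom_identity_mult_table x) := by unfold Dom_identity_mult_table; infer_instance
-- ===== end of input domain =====

-- B validates the table once and finds the first identity row and first identity column
-- in single scans (A revalidates the table and rebuilds a column inside an n×n pair loop).

-- ===== PORT A =====
-- is_mult_table; the isinstance checks are vacuous on List (List Int), `len(i) != len(i)` is never true
def isMultTable (x : List (List Int)) : Bool :=
  if x.length ≤ 0 then false
  else
    let subLen := (x.headD []).length   -- sub_len = len(x[0])
    x.all (fun i =>
      (i.length == i.length) && (i.length == subLen) &&
      i.all (fun m => !(decide (m < 0) || decide ((subLen : Int) ≤ m))))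

-- row_mult_table: x[i]; its asserts hold at every call site admitted by Pre_
def rowMultTable (x : List (List Int)) (i : Int) : Option (List Int) :=
  PySem.List.pyGet? x i

-- col_mult_table: [row[i] for row in x]; none = IndexError (those inputs are outside Pre_)
def colMultTable (x : List (List Int)) (i : Int) : Option (List Int) :=
  List.mapM (fun row => PySem.List.pyGet? row i) x

def identity_mult_table (x : List (List Int)) : Int :=
  if !isMultTable x then -1
  else
    let axis := (PySem.List.pyRange 0 (x.length : Int) 1).foldl (fun acc i => acc ++ [i]) []
    let res := (PySem.List.pyRange 0 (x.length : Int) 1).foldl (fun acc i =>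
      (PySem.List.pyRange 0 (x.length : Int) 1).foldl (fun acc2 j =>
        -- `acc2.or …`: once Python's early `return` has fired, the hit is kept
        acc2.or (
          if colMultTable x j = some axis ∧ rowMultTable x i = some axis then
            -- x[i][j]; both indexes are in range whenever the guard holds
            some (PySem.List.pyGetD (PySem.List.pyGetD x i []) j (-1))
          else none)) acc) none
    match res with
    | some v => v
    | none => -1

-- ===== PORT B =====
def identity_mult_table_alt (x : List (List Int)) : Int :=
  match x with
  | [] => -1
  | r0 :: _ =>
    let w := r0.length
    if x.all (fun row => row.length == w &&
        row.all (fun m => decide (0 ≤ m) && decide (m < (w : Int)))) then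
      let n := x.length
      let axis := (List.range n).map (fun i : Nat => (i : Int))
      match (List.range n).find? (fun i => x.getD i [] == axis) with
      | none => -1
      | some e =>
        match (List.range n).find? (fun j =>
            (List.range n).all (fun i => (x.getD i []).getD j 0 == (i : Int))) with
        | none => -1
        | some j => (x.getD e []).getD j (-1)
    else -1

-- ===== PRECONDITION & SPEC =====
-- validity check used only by Pre_/Raises_ (mirrors is_mult_table's condition, not the ports)
def pvValidB (x : List (List Int)) : Bool :=
  !(x == []) && x.all (fun r => r.length == (x.headD []).length &&
    r.all (fun m => decide (0 ≤ m) && decide (m < ((x.headD []).length : Int))))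

-- Pre_ excludes exactly the inputs where A raises IndexError: valid tables whose row
-- width is smaller than the number of rows (A reads row[j] for every j < len(x)).
def Pre_identity_mult_table (x : List (List Int)) : Prop :=
  pvValidB x = true → x.length ≤ (x.headD []).length
instance (x : List (List Int)) : Decidable (Pre_identity_mult_table x) := by
  unfold Pre_identity_mult_table; infer_instance

def pvWitness_identity_mult_table : List (List Int) := [[1, 0], [0, 1]]

def Spec_identity_mult_table (x : List (List Int)) (out : Int) : Prop := out = identity_mult_table_alt x
instance (x : List (List Int)) (out : Int) : Decidable (Spec_identity_mult_table x out) := by unfold Spec_identity_mult_table; infer_instance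

-- ===== CLAIM (what is proved, stated in full; the proofs are below) =====
def Claim_equal_identity_mult_table : Prop := ∀ (x : List (List Int)), Dom_identity_mult_table x → Pre_identity_mult_table x → Spec_identity_mult_table x (identity_mult_table x)


-- ===== LEMMAS AND PROOFS =====

-- the Prop form of the validity condition shared by both ports' checks
def ValidP (x : List (List Int)) : Prop :=
  x ≠ [] ∧ ∀ r ∈ x, r.length = (x.headD []).length ∧
    ∀ m ∈ r, 0 ≤ m ∧ m < (((x.headD []).length : Int))

-- names for the three scan predicates of B (unfold to exactly B's lambdas)
def axisL (n : Nat) : List Int := (List.range n).map (fun i : Nat => (i : Int))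
def rowOK (x : List (List Int)) (i : Nat) : Bool := x.getD i [] == axisL x.length
def colOK (x : List (List Int)) (j : Nat) : Bool :=
  (List.range x.length).all (fun i => (x.getD i []).getD j 0 == (i : Int))

theorem isMultTable_iff (x : List (List Int)) : isMultTable x = true ↔ ValidP x := by
  cases x with
  | nil => simp [isMultTable, ValidP]
  | cons r t => simp [isMultTable, ValidP, List.all_eq_true]

theorem pvValidB_iff (x : List (List Int)) : pvValidB x = true ↔ ValidP x := by
  cases x with
  | nil => simp [pvValidB, ValidP]
  | cons r t => simp [pvValidB, ValidP, List.all_eq_true]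

-- the fold in A is a first-hit search
theorem foldl_first {α β : Type} (l : List α) (f : α → Option β) (init : Option β) :
    l.foldl (fun acc a => acc.or (f a)) init = init.or (l.findSome? f) := by
  induction l generalizing init with
  | nil => cases init <;> rfl
  | cons h t ih =>
    cases init with
    | some v => simp [List.foldl_cons, ih]
    | none => simp [List.foldl_cons, ih, List.findSome?]; cases f h <;> simp

theorem findSome?_map' {α β γ : Type} (l : List α) (g : α → β) (f : β → Option γ) :
    (l.map g).findSome? f = l.findSome? (fun a => f (g a)) := by
  induction l with
  | nil => rfl
  | cons h t ih => simp [List.findSome?]; cases f (g h) <;> simp [ih]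

theorem findSome?_congr' {α β : Type} (l : List α) (f g : α → Option β)
    (h : ∀ a ∈ l, f a = g a) : l.findSome? f = l.findSome? g := by
  induction l with
  | nil => rfl
  | cons a t ih =>
    simp only [List.findSome?, h a (by simp)]
    cases g a <;> simp [ih (fun a ha => h a (by simp [ha]))]

theorem findSome?_guard {α β : Type} (l : List α) (p : α → Bool) (g : α → β) :
    l.findSome? (fun a => if p a = true then some (g a) else none) = (l.find? p).map g := by
  induction l with
  | nil => rfl
  | cons h t ih => by_cases hp : p h <;> simp [List.findSome?, List.find?, hp, ih]

theorem findSome?_none' {α β : Type} (l : List α) :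
    l.findSome? (fun _ => (none : Option β)) = none := by
  induction l with
  | nil => rfl
  | cons h t ih => simp [List.findSome?, ih]

theorem mapM_all_some {α β : Type} (x : List α) (f : α → Option β) (g : α → β)
    (h : ∀ r ∈ x, f r = some (g r)) : List.mapM f x = some (x.map g) := by
  induction x with
  | nil => rfl
  | cons r t ih =>
    simp [List.mapM_cons, h r (by simp), ih (fun r hr => h r (by simp [hr]))]

theorem pyRange_zero_map (n : Nat) :
    PySem.List.pyRange 0 (n : Int) 1 = (List.range n).map (fun k : Nat => (k : Int)) := by
  simp [PySem.List.pyRange_zero_nat]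

theorem ite_and_none {β : Type} (P Q : Prop) [Decidable P] [Decidable Q] (v : β) :
    (if P ∧ Q then some v else none) = (if Q then (if P then some v else none) else none) := by
  by_cases hp : P <;> by_cases hq : Q <;> simp [hp, hq]

-- pointwise description of "list = axis"
theorem map_eq_axis_iff (x : List (List Int)) (f : List Int → Int) :
    x.map f = axisL x.length ↔ ∀ i, (h : i < x.length) → f (x[i]) = (i : Int) := by
  unfold axisL
  constructor
  · intro h i hi
    have h1 : (x.map f)[i]'(by rw [List.length_map]; exact hi)
        = ((List.range x.length).map (fun i : Nat => (i : Int)))[i]'(by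
            rw [List.length_map, List.length_range]; exact hi) :=
      List.getElem_of_eq h _
    rw [List.getElem_map, List.getElem_map, List.getElem_range] at h1
    exact h1
  · intro h
    refine List.ext_getElem (by rw [List.length_map, List.length_map, List.length_range]) ?_
    intro i h1 h2
    rw [List.getElem_map, List.getElem_map, List.getElem_range]
    exact h i (by rw [List.length_map] at h1; exact h1)

-- A's loop conditions, characterised on in-range indices of a valid wide-enough table
theorem row_cond_iff (x : List (List Int)) (i : Nat) (hi : i < x.length) :
    (rowMultTable x (i : Int) = some (axisL x.length) ↔ rowOK x i = true) := by
  unfold rowOK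
  rw [rowMultTable, PySem.List.pyGet?_natCast, List.getElem?_eq_getElem hi,
    Option.some_inj, beq_iff_eq, List.getD_eq_getElem x [] hi]

theorem col_cond_iff (x : List (List Int)) (j : Nat)
    (hjw : ∀ r ∈ x, j < r.length) :
    (colMultTable x (j : Int) = some (axisL x.length) ↔ colOK x j = true) := by
  have hmap : colMultTable x (j : Int) = some (x.map (fun r => r.getD j 0)) := by
    apply mapM_all_some
    intro r hr
    rw [PySem.List.pyGet?_natCast, List.getElem?_eq_getElem (hjw r hr),
      List.getD_eq_getElem r 0 (hjw r hr)]
  rw [hmap, Option.some_inj, map_eq_axis_iff x (fun r => r.getD j 0)]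
  unfold colOK
  simp only [List.all_eq_true, List.mem_range]
  constructor
  · intro h i hi
    rw [List.getD_eq_getElem x [] hi]
    simp only [beq_iff_eq, List.getD_eq_getElem?_getD] at *
    exact h i hi
  · intro h i hi
    have := h i hi
    rw [List.getD_eq_getElem x [] hi] at this
    simp only [beq_iff_eq, List.getD_eq_getElem?_getD] at *
    exact this

-- evaluation of A on a valid table with enough columns
theorem A_valid_eval (x : List (List Int)) (hv : ValidP x)
    (hw : x.length ≤ (x.headD []).length) :
    identity_mult_table x =
      (match (List.range x.length).find? (rowOK x) with
       | none => -1
       | some e =>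
         match (List.range x.length).find? (colOK x) with
         | none => -1
         | some j => (x.getD e []).getD j (-1)) := by
  have hA : isMultTable x = true := (isMultTable_iff x).mpr hv
  obtain ⟨hne, hrows⟩ := hv
  unfold identity_mult_table
  rw [hA]
  have haxis : (PySem.List.pyRange 0 (x.length : Int) 1).foldl
      (fun acc i => acc ++ [i]) ([] : List Int) = axisL x.length := by
    rw [pyRange_zero_map]
    simpa [axisL] using
      PySem.List.foldl_append_singleton ((List.range x.length).map (fun k : Nat => (k : Int))) []
  simp only [Bool.not_true, Bool.false_eq_true, if_false, haxis]
  simp only [foldl_first, Option.none_or, pyRange_zero_map, findSome?_map']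
  have hstep1 : ∀ i ∈ List.range x.length,
      ((List.range x.length).findSome? (fun j : Nat =>
        if colMultTable x (j : Int) = some (axisL x.length) ∧
            rowMultTable x (i : Int) = some (axisL x.length)
        then some (PySem.List.pyGetD (PySem.List.pyGetD x (i : Int) []) (j : Int) (-1))
        else none))
      = (if rowOK x i = true
         then ((List.range x.length).find? (colOK x)).map (fun j => (x.getD i []).getD j (-1))
         else none) := by
    intro i hi
    rw [List.mem_range] at hi
    have hbody : ∀ j ∈ List.range x.length,
        (if colMultTable x (j : Int) = some (axisL x.length) ∧
            rowMultTable x (i : Int) = some (axisL x.length)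
         then some (PySem.List.pyGetD (PySem.List.pyGetD x (i : Int) []) (j : Int) (-1))
         else none)
        = (if rowOK x i = true
           then (if colOK x j = true then some ((x.getD i []).getD j (-1)) else none)
           else none) := by
      intro j hj
      rw [List.mem_range] at hj
      have hc := col_cond_iff x j (fun r hr => by have := (hrows r hr).1; omega)
      have hr' := row_cond_iff x i hi
      have hval : PySem.List.pyGetD (PySem.List.pyGetD x (i : Int) []) (j : Int) (-1)
          = (x.getD i []).getD j (-1) := by
        rw [PySem.List.pyGetD_natCast, PySem.List.pyGetD_natCast]
      rw [hval, if_congr (and_congr hc hr') rfl rfl, ite_and_none]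
    rw [findSome?_congr' _ _ _ hbody]
    by_cases hri : rowOK x i = true
    · simp only [hri, if_true]
      exact findSome?_guard _ _ _
    · simp only [hri, Bool.false_eq_true, if_false]
      exact findSome?_none' _
  rw [findSome?_congr' _ _ _ hstep1]
  cases hcf : (List.range x.length).find? (colOK x) with
  | none =>
    have : ((List.range x.length).findSome? (fun i : Nat =>
        if rowOK x i = true
        then ((none : Option Nat)).map (fun j => (x.getD i []).getD j (-1))
        else none)) = none := by
      rw [findSome?_congr' _ _ (fun _ => none) (by intro a _; by_cases h : rowOK x a = true <;> simp [h])]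
      exact findSome?_none' _
    rw [this]
    cases (List.range x.length).find? (rowOK x) <;> rfl
  | some j0 =>
    have : ((List.range x.length).findSome? (fun i : Nat =>
        if rowOK x i = true
        then ((some j0 : Option Nat)).map (fun j => (x.getD i []).getD j (-1))
        else none)) = ((List.range x.length).find? (rowOK x)).map (fun i => (x.getD i []).getD j0 (-1)) := by
      rw [findSome?_congr' _ _ (fun i => if rowOK x i = true then some ((x.getD i []).getD j0 (-1)) else none)
        (by intro a _; by_cases h : rowOK x a = true <;> simp [h])]
      exact findSome?_guard _ _ _
    rw [this]
    cases (List.range x.length).find? (rowOK x) <;> rfl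

-- evaluation of B on a valid table
theorem B_valid_eval (x : List (List Int)) (hv : ValidP x) :
    identity_mult_table_alt x =
      (match (List.range x.length).find? (rowOK x) with
       | none => -1
       | some e =>
         match (List.range x.length).find? (colOK x) with
         | none => -1
         | some j => (x.getD e []).getD j (-1)) := by
  obtain ⟨hne, hrows⟩ := hv
  cases x with
  | nil => exact absurd rfl hne
  | cons r0 t =>
    have hBcond : ((r0 :: t).all (fun row => row.length == r0.length &&
        row.all (fun m => decide (0 ≤ m) && decide (m < (r0.length : Int))))) = true := by
      simp only [List.all_eq_true, Bool.and_eq_true, beq_iff_eq]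
      intro r hr
      have h1 := hrows r hr
      simp only [List.headD_cons] at h1
      refine ⟨h1.1, ?_⟩
      simp only [decide_eq_true_eq]
      intro m hm; have := h1.2 m hm; omega
    simp only [identity_mult_table_alt, hBcond, if_true]
    rfl

theorem identity_mult_table_eq (x : List (List Int))
    (hpre : Pre_identity_mult_table x) :
    identity_mult_table x = identity_mult_table_alt x := by
  by_cases hv : ValidP x
  · rw [A_valid_eval x hv (hpre ((pvValidB_iff x).mpr hv)), B_valid_eval x hv]
  · -- invalid table: both return -1
    have hA : isMultTable x = false := by
      cases h : isMultTable x
      · rfl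
      · exact absurd ((isMultTable_iff x).mp h) hv
    unfold identity_mult_table
    rw [hA]
    cases x with
    | nil => rfl
    | cons r0 t =>
      have hc : ((r0 :: t).all (fun row => row.length == r0.length &&
          row.all (fun m => decide (0 ≤ m) && decide (m < (r0.length : Int))))) = false := by
        cases h : (r0 :: t).all (fun row => row.length == r0.length &&
            row.all (fun m => decide (0 ≤ m) && decide (m < (r0.length : Int))))
        · rfl
        · exfalso; apply hv
          refine ⟨by simp, ?_⟩
          simp only [List.all_eq_true, Bool.and_eq_true, beq_iff_eq] at h
          intro r hr
          have h1 := h r hr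
          refine ⟨by simpa using h1.1, fun m hm => ?_⟩
          have h2 := h1.2
          simp only [decide_eq_true_eq] at h2
          have := h2 m hm
          simp only [List.headD_cons]
          omega
      simp [identity_mult_table_alt, hc]

-- ===== VERDICT (by name: the statement is the Claim_ definition above) =====
theorem identity_mult_table_spec : Claim_equal_identity_mult_table := by
  intro x _ hpre
  unfold Spec_identity_mult_table
  exact identity_mult_table_eq x hpre
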